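-- pv_equiv track=rewrite | github.com/dongchirua/ASR_benchmark | src/refine_text.py | group_spine_annotation
-- ===== SOURCE A (Python) =====
-- def group_spine_annotation(text):
--     txt = text.split()
--     new_text = []
--     i = 0
--     while i < len(txt):
--         flag = False
--         if txt[i] in set(['c', 'd', 'l', 's']):
--             if i+1 < len(txt):
--                 if txt[i + 1].isdigit():
--                     new_text.append(txt[i] + txt[i + 1])
--                     i = i + 2
--                     flag = True
--         if flag is False:
--             new_text.append(txt[i])
--             i = i + 1
--     return ' '.join(new_text)
-- ===== SOURCE B (Python) =====
-- def group_spine_annotation(text):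
--     result = []
--     for tok in text.split():
--         if tok.isdigit() and result and result[-1] in ('c', 'd', 'l', 's'):
--             result[-1] = result[-1] + tok
--         else:
--             result.append(tok)
--     return ' '.join(result)
-- ===== Notes on version B (the rewrite author's own statement) =====
-- stated objective: simpler
-- what changed: Replaces A's index-based while loop with forward peek and skip-by-two by a plain for-loop over the tokens that looks backward at the last emitted token and merges a digit into it.
import Mathlib
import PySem

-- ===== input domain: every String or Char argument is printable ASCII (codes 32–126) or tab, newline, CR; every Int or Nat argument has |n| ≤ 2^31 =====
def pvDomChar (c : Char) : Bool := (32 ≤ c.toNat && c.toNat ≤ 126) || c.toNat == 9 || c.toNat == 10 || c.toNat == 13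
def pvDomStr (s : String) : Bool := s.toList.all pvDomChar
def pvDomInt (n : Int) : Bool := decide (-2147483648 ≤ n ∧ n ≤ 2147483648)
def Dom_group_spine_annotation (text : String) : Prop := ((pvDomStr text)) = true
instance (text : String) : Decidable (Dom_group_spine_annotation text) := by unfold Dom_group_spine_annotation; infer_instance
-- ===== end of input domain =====

-- B replaces A's index while-loop (forward peek at txt[i+1], skip by two) with a single
-- backward-looking for-loop that merges a digit token into the last emitted label token (objective: simpler).

-- ===== PORT A =====
-- A's while loop over the token list: i points at the head; 'i+1 < len(txt)' = the tail is nonempty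
-- (on a last token both branches of A append just txt[i], so the [t] case returns [t]).
def gsaLoop : List String → List String
  | [] => []
  | [t] => [t]
  | t :: d :: rest =>
    if t ∈ PySem.Set.ofList ["c", "d", "l", "s"] then
      if PySem.Str.strIsdigit d then (t ++ d) :: gsaLoop rest
      else t :: gsaLoop (d :: rest)
    else t :: gsaLoop (d :: rest)

def group_spine_annotation (text : String) : String :=
  PySem.Str.join " " (gsaLoop (PySem.Str.split₀ text))

-- ===== PORT B =====
def gsaLabels : List String := ["c", "d", "l", "s"]

def gsaStep (acc : List String) (tok : String) : List String :=
  if PySem.Str.strIsdigit tok = true ∧ acc ≠ [] ∧ acc.getLastD "" ∈ gsaLabels then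
    acc.dropLast ++ [acc.getLastD "" ++ tok]
  else
    acc ++ [tok]

def group_spine_annotation_alt (text : String) : String :=
  PySem.Str.join " " ((PySem.Str.split₀ text).foldl gsaStep [])

-- ===== PRECONDITION & SPEC =====
def Spec_group_spine_annotation (text : String) (out : String) : Prop := out = group_spine_annotation_alt text
instance (text : String) (out : String) : Decidable (Spec_group_spine_annotation text out) := by unfold Spec_group_spine_annotation; infer_instance

-- ===== CLAIM (what is proved, stated in full; the proofs are below) =====
def Claim_equal_group_spine_annotation : Prop := ∀ (text : String), Dom_group_spine_annotation text → Spec_group_spine_annotation text (group_spine_annotation text)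

-- ===== LEMMAS AND PROOFS =====

-- 'no merge can fire on the first step of B': the head of ts is not a digit, or acc's last is not a label
def gsaOk (acc ts : List String) : Prop :=
  ∀ d, ts.head? = some d → PySem.Str.strIsdigit d = true →
    ¬ (acc ≠ [] ∧ acc.getLastD "" ∈ gsaLabels)

lemma gsaSet_eq : PySem.Set.ofList ["c", "d", "l", "s"] = gsaLabels := by decide

lemma gsaStep_nomerge (acc : List String) (t : String) (ts : List String)
    (h : gsaOk acc (t :: ts)) : gsaStep acc t = acc ++ [t] := by
  unfold gsaStep
  split_ifs with hc
  · exact absurd ⟨hc.2.1, hc.2.2⟩ (h t rfl hc.1)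
  · rfl

lemma digit_nonempty (d : String) (h : PySem.Str.strIsdigit d = true) : d.toList ≠ [] := by
  intro he
  simp only [PySem.Str.strIsdigit_eq] at h
  rw [he] at h
  exact absurd h (by decide)

lemma label_len (t : String) (h : t ∈ gsaLabels) : t.toList.length = 1 := by
  fin_cases h <;> decide

lemma merged_not_label (t d : String) (ht : t ∈ gsaLabels)
    (hd : PySem.Str.strIsdigit d = true) : t ++ d ∉ gsaLabels := by
  intro hm
  have h1 := label_len t ht
  have h2 := label_len (t ++ d) hm
  have h3 : (t ++ d).toList = t.toList ++ d.toList := by simp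
  have h4 : d.toList.length ≠ 0 := by simpa using digit_nonempty d hd
  rw [h3, List.length_append, h1] at h2
  omega

lemma gsaKey : ∀ ts acc, gsaOk acc ts → ts.foldl gsaStep acc = acc ++ gsaLoop ts := by
  intro ts
  induction ts using gsaLoop.induct with
  | case1 => intro acc _; simp [gsaLoop]
  | case2 t =>
    intro acc h
    rw [List.foldl_cons, List.foldl_nil, gsaStep_nomerge acc t _ h]
    simp [gsaLoop]
  | case3 t d rest htS hd ih =>
    intro acc h
    have htL : t ∈ gsaLabels := by rwa [gsaSet_eq] at htS
    have h2 : gsaStep (acc ++ [t]) d = acc ++ [t ++ d] := by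
      unfold gsaStep
      rw [if_pos ⟨hd, by simp, by simp [htL]⟩]
      simp
    have hok : gsaOk (acc ++ [t ++ d]) rest := by
      intro e _ _
      rintro ⟨-, hmem⟩
      exact merged_not_label t d htL hd (by simpa using hmem)
    have hd' : PySem.Chars.strIsdigit d.toList = true := by simpa using hd
    rw [List.foldl_cons, gsaStep_nomerge acc t _ h, List.foldl_cons, h2, ih _ hok]
    simp [gsaLoop, htS, hd']
  | case4 t d rest htS hd ih =>
    intro acc h
    have hok : gsaOk (acc ++ [t]) (d :: rest) := by
      intro e he hdig
      simp only [List.head?_cons, Option.some.injEq] at he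
      subst he
      exact absurd hdig hd
    have hd' : PySem.Chars.strIsdigit d.toList = false := by simpa using hd
    rw [List.foldl_cons, gsaStep_nomerge acc t _ h, ih _ hok]
    simp [gsaLoop, htS, hd']
  | case5 t d rest htS ih =>
    intro acc h
    have hok : gsaOk (acc ++ [t]) (d :: rest) := by
      intro e _ _
      rintro ⟨-, hmem⟩
      have ht : t ∈ gsaLabels := by simpa using hmem
      rw [← gsaSet_eq] at ht
      exact htS ht
    rw [List.foldl_cons, gsaStep_nomerge acc t _ h, ih _ hok]
    simp [gsaLoop, htS]

-- ===== VERDICT (by name: the statement is the Claim_ definition above) =====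
theorem group_spine_annotation_spec : Claim_equal_group_spine_annotation := by
  intro text _
  unfold Spec_group_spine_annotation group_spine_annotation group_spine_annotation_alt
  rw [gsaKey _ [] (by intro d _ _ h; exact h.1 rfl)]
  simp
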